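/- GENERATED by mk_final_copies.py from the proof of the farm's unit `codebook_decode_scalar_raw.2` (farm:codebook_decode_scalar_raw.2.1: Proof.lean) as the
   re-elaboration sweep compiled it — do not edit. -/
/-
  Unit codebook_decode_scalar_raw.2: segment 2 of codebook_decode_scalar_raw (10D62EH … 10D7BFH; stb_vorbis_fixed.c:1695 – 1719), from
  the assertion `ScalarRaw.AtBinary` to `ScalarRaw.AtExit`. Three stages, chained by `ReachVia.trans`:
      pre_ok   (Lemmas.lean)  AtBinary → AtSearchHead 0 se          `code = bit_reverse(f->acc)`, `n = c->sorted_entries`, `x = 0`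
      loop_ok  (Lemmas.lean)  AtSearchHead x n → AtSearchHead x' 1        the binary search, invariant BS, measure `n`
      tail_ok  (here)         AtSearchHead x 1 → AtExit             translation (K4c), length, FIX 22, consume the bits
-/
import Asan.CheckWalk
import Vorbis.Spec.Units.codebook_decode_scalar_raw_2
import Vorbis.Spec.Worked.codebook_decode_scalar_raw_2_Lemmas

open X86 X86.User Asan Vorbis Vorbis.Spec

set_option maxRecDepth 4000
set_option maxHeartbeats 4000000

namespace Vorbis.Spec.codebook_decode_scalar_raw_2

/-- **After the binary search** (10D66DH with `n = 1` … 10D775H, stb_vorbis_fixed.c:1698, 1709 – 1719): `x < se` (BS); for a dense book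
`x = sorted_values[x] < entries` (K4c); `len = codeword_lengths[x]`, `x < N(c)`; FIX 22's `len = 255` exit; `valid_bits < len`:
`valid_bits = 0`, −1; else the bits are consumed (V1: `0 ≤ valid_bits − len ≤ 32`). Six paths into the exit join. -/
theorem tail_ok (Lay : Layout) (hLay : Lay.hi = 0x1000000) (μ : Microarch) (hμ : UserX.MicroOK μ) (u₀ : State)
    (hcode : HasCodeNat Lay u₀ Vorbis.L.codebook_decode_scalar_raw.entry Vorbis.Code.code_codebook_decode_scalar_raw.nat
      Vorbis.L.codebook_decode_scalar_raw.size)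
    (hload4 : Asan.SmallCheck Lay μ Vorbis.WayInv (Vorbis.CodeOK u₀) [.rax, .rcx, .rdx] 4 Vorbis.L.__asan_load4_noabort.entry)
    (hload8 : Asan.SmallCheck Lay μ Vorbis.WayInv (Vorbis.CodeOK u₀) [.rax, .rcx, .rdx] 8 Vorbis.L.__asan_load8_noabort.entry)
    (hload1 : Asan.SmallCheck Lay μ Vorbis.WayInv (Vorbis.CodeOK u₀) [.rax, .rdx] 1 Vorbis.L.__asan_load1_noabort.entry)
    (hstore4 : Asan.SmallCheck Lay μ Vorbis.WayInv (Vorbis.CodeOK u₀) [.rax, .rcx, .rdx] 4 Vorbis.L.__asan_store4_noabort.entry)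
    (others : List Obj) (frames : List (Nat × FrameLayout)) (Blk : Block → Prop) (len : Nat) (ret : Word) (e u : State)
    (x : Nat) (s : State) (hat : AtSearchHead others frames Blk len u₀ ret e u x 1 s) :
    ReachVia Lay μ WayInv s (fun v => ScalarRaw.AtExit others frames Blk len u₀ ret e v) := by
  obtain ⟨hbin, w_rip, h_rsp, hrbp, hx, hn, hBS, hsameS, hunS, w_eq, hinvS⟩ := hat
  have hbin0 := hbin
  obtain ⟨-, hcommon, -, hf, hsne⟩ := hbin
  obtain ⟨hmid, hpre, hreader, hcb, hapart⟩ := hcommon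
  have he := hmid.atEntry
  have he0 := he
  have hun := hmid.untouched
  v_entry he
  -- the ghosts: `f`, `c` as numbers
  obtain ⟨f, hfn⟩ : ∃ f : Nat, (e.reg .rdi).toNat = f := ⟨_, rfl⟩
  obtain ⟨c, hcn⟩ : ∃ c : Nat, (e.reg .rsi).toNat = c := ⟨_, rfl⟩
  have hrdi : e.reg .rdi = addr f := eq_addr _ _ hfn
  have hrsi : e.reg .rsi = addr c := eq_addr _ _ hcn
  have hF := facts_of hpre hfn hcn he_room he_top he_align
  have hsh := hpre.reader.shadow
  have hL := hpre.reader.env.live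
  have hok := hpre.ok
  obtain ⟨Bc, hBc, hinc⟩ := hpre.book
  rw [hfn] at hreader hapart
  rw [hcn] at hsne hcb hapart hinc hBS
  rw [hrdi] at hf
  have hbits := hreader.bits
  have hoc := hF.book_off
  have hcw : 0x119d40 ≤ c ∧ c + 2120 ≤ 0xC00000 := ⟨hF.book_lo, hF.book_hi⟩
  have hof := hF.geo.obj_off
  have hfw : 0x119d40 ≤ f ∧ f + 1808 ≤ 0xC00000 := ⟨hF.obj_lo, hF.geo.obj_hi⟩
  -- the number of sorted entries; `x < se` (BS at the exit)
  have hse1 : 1 ≤ Codebook.sorted_entries u.mem c := (hcb.sorted_codewords_ne_zero_iff hok).mp hsne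
  obtain ⟨se, hse⟩ : ∃ se : Nat, Codebook.sorted_entries u.mem c = (se : Int) :=
    ⟨(Codebook.sorted_entries u.mem c).toNat, by omega⟩
  have hent_lt := hcb.K1.ent_lt
  have hse_le := hcb.K2.se_le
  rw [hse, Int.toNat_natCast] at hBS
  have hxse : x < se := hBS.exit
  -- the fields of `*c` and `*f` the code loads, as numbers
  obtain ⟨sp, hsp⟩ : ∃ sp : Nat, Codebook.sparse u.mem c = sp := ⟨_, rfl⟩
  obtain ⟨svp, hsvp⟩ : ∃ svp : Nat, Codebook.sorted_values u.mem c = svp := ⟨_, rfl⟩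
  obtain ⟨clp, hclp⟩ : ∃ clp : Nat, Codebook.codeword_lengths u.mem c = clp := ⟨_, rfl⟩
  obtain ⟨vbn, hvbn⟩ : ∃ vbn : Nat, u.mem.u32 (f + 1768) = vbn := ⟨_, rfl⟩
  have r_sp_u : u.mem.readLE (addr c + 27) 1 = sp := by
    rw [← hsp]
    simp only [vfield, vacc, voff]
  have r_svp_u : u.mem.readLE (addr c + 2104) 8 = svp := by
    rw [← hsvp]
    simp only [vfield, vacc, voff]
  have r_clp_u : u.mem.readLE (addr c + 8) 8 = clp := by
    rw [← hclp]
    simp only [vfield, vacc, voff]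
  have r_vb_u : u.mem.readLE (addr f + 1768) 4 = vbn := by
    rw [← hvbn]
    simp only [vfield]
  have hsp_lt : sp < 256 := by
    rw [← hsp]
    simp only [vacc, voff]
    exact u.mem.u8_lt _
  -- V1 for the `valid_bits` now
  have hV1 : -1 ≤ (BitVec.ofNat 32 vbn).toInt ∧ (BitVec.ofNat 32 vbn).toInt ≤ 32 := by
    have h := hbits.V1
    simp only [vacc, voff] at h
    rw [← hvbn, X86.User.Mem.toInt_ofNat32_u32]
    exact h
  -- `sorted_values[x]`: the word `y` at `svp + 4 x`, inside the `sorted_values` block (K4), an entry number (K4c)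
  have hsv5 := hcb.sorted_values_ge hok hse1
  have hsvblk := hcb.K4.sv hse1
  rw [hsvp] at hsv5
  rw [hsvp, hse, Int.toNat_natCast] at hsvblk
  have hwsv := hF.blk_off _ (svp + 4 * x) 4 hsvblk (by omega) ⟨by show svp - 4 ≤ svp + 4 * x; omega,
    by show svp + 4 * x + 4 ≤ svp - 4 + 4 * (se + 1); omega⟩
  obtain ⟨y, hy⟩ : ∃ y : Nat, u.mem.u32 (svp + 4 * x) = y := ⟨_, rfl⟩
  have hk4c := hcb.K4c x (by omega)
  simp only [Codebook.sorted_values_at, hsvp] at hk4c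
  have hyi : u.mem.i32 (svp + 4 * x) = (y : Int) := by
    have := u.mem.i32_cases (svp + 4 * x)
    omega
  rw [hyi] at hk4c
  have hy_lt : y < 16777216 := by omega
  have ea_sv : (Word.ofBV (BitVec.signExtend 64 (Word.part .w32 (addr x))) <<< 2 + UInt64.ofNat svp).toNat = svp + 4 * x :=
    elem4_toNat x svp (by omega) (by omega)
  have r_svx_u : u.mem.readLE (addr (svp + 4 * x)) 4 = y := hy
  -- `codeword_lengths`: `N(c)` bytes (K3), off the frame; the index is below `N(c)` on either path
  have hNpos : 1 ≤ Codebook.N u.mem c := by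
    unfold Codebook.N
    split <;> omega
  obtain ⟨Nn, hNn⟩ : ∃ Nn : Nat, Codebook.N u.mem c = (Nn : Int) := ⟨(Codebook.N u.mem c).toNat, by omega⟩
  have hclblk := hcb.lengths_block
  rw [hclp, hNn, Int.toNat_natCast] at hclblk
  have hwcl := hF.blk_off _ clp Nn hclblk (by omega) ⟨Nat.le_refl _, Nat.le_refl _⟩
  have hyN : sp % 256 = 0 → y < Nn := by
    intro h0
    have e0 : Codebook.sparse u.mem c = 0 := by omega
    rw [Codebook.N_dense e0] at hNn
    omega
  have hxN : ¬ sp % 256 = 0 → x < Nn := by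
    intro h0
    have e0 : Codebook.sparse u.mem c ≠ 0 := by omega
    rw [Codebook.N_sparse e0] at hNn
    omega
  have ea_ld : (Word.ofBV (BitVec.signExtend 64 (BitVec.ofNat 32 y)) + UInt64.ofNat clp).toNat = clp + y :=
    elem1_ofNat_toNat y clp (by omega) (by omega)
  have ea_ls : (Word.ofBV (BitVec.signExtend 64 (Word.part .w32 (addr x))) + UInt64.ofNat clp).toNat = clp + x :=
    elem1_toNat x clp (by omega) (by omega)
  -- the loads in the memory of the loop head
  have r_sp : s.mem.readLE (addr c + 27) 1 = sp := by u_frame r_sp_u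
  have r_svp : s.mem.readLE (addr c + 2104) 8 = svp := by u_frame r_svp_u
  have r_clp : s.mem.readLE (addr c + 8) 8 = clp := by u_frame r_clp_u
  have r_vb : s.mem.readLE (addr f + 1768) 4 = vbn := by u_frame r_vb_u
  have r_f : UInt64.ofNat (s.mem.readLE (e.reg .rsp - 80) 8) = addr f := by u_frame hf
  have r_svx : s.mem.readLE (Word.ofBV (BitVec.signExtend 64 (Word.part .w32 (addr x))) <<< 2 + UInt64.ofNat svp) 4 = y := by
    have ea2 : (addr (svp + 4 * x)).toNat = svp + 4 * x := toNat_addr _ (by omega)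
    rw [eq_addr _ _ ea_sv]
    u_frame r_svx_u
  obtain ⟨lbd, r_lbd⟩ : ∃ lbd : Nat,
      s.mem.readLE (Word.ofBV (BitVec.signExtend 64 (BitVec.ofNat 32 y)) + UInt64.ofNat clp) 1 = lbd := ⟨_, rfl⟩
  obtain ⟨lbs, r_lbs⟩ : ∃ lbs : Nat,
      s.mem.readLE (Word.ofBV (BitVec.signExtend 64 (Word.part .w32 (addr x))) + UInt64.ofNat clp) 1 = lbs := ⟨_, rfl⟩
  obtain ⟨acc0, r_acc⟩ : ∃ acc0 : Nat, s.mem.readLE (e.reg .rsp - 72) 4 = acc0 := ⟨_, rfl⟩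
  have hlbd : lbd < 256 := by
    rw [← r_lbd]
    exact Mem.readLE_lt' _ _ 1
  have hlbs : lbs < 256 := by
    rw [← r_lbs]
    exact Mem.readLE_lt' _ _ 1
  have h_rbp : s.reg .rbp = addr c := by rw [hrbp, hrsi]
  have h_r12 : s.reg .r12 = addr x := hx
  have h_r13 : s.reg .r13 = 1 := by
    rw [hn]
    rfl
  have hdf : s.flags .df = false := (show abiInv _ from hinvS).1
  have hmx : s.mxcsr &&& 0x1F80 = 0x1F80 := (show abiInv _ from hinvS).2
  have hsse := Vorbis.sseOK_of_abiInv hinvS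
  -- what the exit assertion carries, at the loop head
  have hC0 : Carried others frames Blk len ret e f u.mem :=
    ⟨hmid.ra, hmid.r15, hmid.r14, hmid.r13, hmid.r12, hmid.rbp, hmid.rbx, hmid.same, hmid.untouched, hreader⟩
  have hCs : Carried others frames Blk len ret e f s.mem := by
    refine hC0.stack hF.geo hsameS ?_
    intro w hw
    simp only [List.mem_cons, List.mem_nil_iff, or_false] at hw
    rcases hw with rfl | rfl | rfl <;> simp only [] <;> omega
  have hNe := N_entry hpre hfn hcn hF hmid.same
  clear hmid hC0 hinvS hrbp hx hn hbin0
  u_walk hcode [hμ.vendor] until [Vorbis.L.codebook_decode_scalar_raw.cut5, Vorbis.L.codebook_decode_scalar_raw.ret8] span [Vorbis.L.textLo, Vorbis.L.textHi] side (v_side)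
  case check_10d6eb =>
    -- 0x10d6eb, load1 [c + 0x1b] (`c->sparse`): a field of `*c`
    have hu1 : ShadowUntouched u.mem s_10d6eb.mem := by v_untouched
    have hs := Codebook.site_field hL hBc hinc 27 1 (by simp only [voff]; omega) (by omega) rfl
    exact check_site hsh.inv (Mem.EqOn.trans hun hu1) hs (by u_omega)
  case check_10d720 =>
    -- 0x10d720, load8 [c + 8] (`c->codeword_lengths`), sparse book
    have hu1 : ShadowUntouched u.mem s_10d720.mem := by v_untouched
    have hs := Codebook.site_field hL hBc hinc 8 8 (by simp only [voff]; omega) (by omega) rfl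
    exact check_site hsh.inv (Mem.EqOn.trans hun hu1) hs (by u_omega)
  case check_10d72f =>
    -- 0x10d72f, load1 [codeword_lengths + x]: `x < N(c)`
    have hu1 : ShadowUntouched u.mem s_10d72f.mem := by v_untouched
    have hi : ((x : Nat) : Int) < Codebook.N u.mem c := by
      have := hxN hbr_10d6f4
      omega
    have hs := hcb.site_codeword_lengths hL x hi (a := clp + x) (by simp only [Codebook.codeword_lengths_at, hclp])
    exact check_site hsh.inv (Mem.EqOn.trans hun hu1) hs ea_ls
  case check_10d793 =>
    -- 0x10d793, store4 [f + 0x6e8] (`f->valid_bits`, FIX 22), sparse book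
    have hu1 : ShadowUntouched u.mem s_10d793.mem := by v_untouched
    have hs := hbits.site_field hL 1768 4 (by omega) (by omega) rfl
    exact check_site hsh.inv (Mem.EqOn.trans hun hu1) hs (by u_omega)
  case check_10d74d =>
    -- 0x10d74d, load4 [f + 0x6e8] (`f->valid_bits`), sparse book
    have hu1 : ShadowUntouched u.mem s_10d74d.mem := by v_untouched
    have hs := hbits.site_field hL 1768 4 (by omega) (by omega) rfl
    exact check_site hsh.inv (Mem.EqOn.trans hun hu1) hs (by u_omega)
  case check_10d6fd =>
    -- 0x10d6fd, load8 [c + 0x838] (`c->sorted_values`)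
    have hu1 : ShadowUntouched u.mem s_10d6fd.mem := by v_untouched
    have hs := Codebook.site_field hL hBc hinc 2104 8 (by simp only [voff]; omega) (by omega) rfl
    exact check_site hsh.inv (Mem.EqOn.trans hun hu1) hs (by u_omega)
  case check_10d713 =>
    -- 0x10d713, load4 [sorted_values + 4 x]: `x < se` (BS at the exit)
    have hu1 : ShadowUntouched u.mem s_10d713.mem := by v_untouched
    have hi : ((x : Nat) : Int) < Codebook.sorted_entries u.mem c := by omega
    have hs := hcb.site_sorted_values hL x hi (a := svp + 4 * x) (by simp only [Codebook.sorted_values_at, hsvp])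
    exact check_site hsh.inv (Mem.EqOn.trans hun hu1) hs ea_sv
  case check_10d720 =>
    -- 0x10d720, load8 [c + 8] (`c->codeword_lengths`), dense book
    have hu1 : ShadowUntouched u.mem s_10d720.mem := by v_untouched
    have hs := Codebook.site_field hL hBc hinc 8 8 (by simp only [voff]; omega) (by omega) rfl
    exact check_site hsh.inv (Mem.EqOn.trans hun hu1) hs (by u_omega)
  case check_10d72f =>
    -- 0x10d72f, load1 [codeword_lengths + y]: `y < N(c)`
    have hu1 : ShadowUntouched u.mem s_10d72f.mem := by v_untouched
    have hi : ((y : Nat) : Int) < Codebook.N u.mem c := by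
      have := hyN hbr_10d6f4
      omega
    have hs := hcb.site_codeword_lengths hL y hi (a := clp + y) (by simp only [Codebook.codeword_lengths_at, hclp])
    exact check_site hsh.inv (Mem.EqOn.trans hun hu1) hs ea_ld
  case check_10d793 =>
    -- 0x10d793, store4 [f + 0x6e8] (`f->valid_bits`, FIX 22), dense book
    have hu1 : ShadowUntouched u.mem s_10d793.mem := by v_untouched
    have hs := hbits.site_field hL 1768 4 (by omega) (by omega) rfl
    exact check_site hsh.inv (Mem.EqOn.trans hun hu1) hs (by u_omega)
  case check_10d74d =>
    -- 0x10d74d, load4 [f + 0x6e8] (`f->valid_bits`), dense book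
    have hu1 : ShadowUntouched u.mem s_10d74d.mem := by v_untouched
    have hs := hbits.site_field hL 1768 4 (by omega) (by omega) rfl
    exact check_site hsh.inv (Mem.EqOn.trans hun hu1) hs (by u_omega)
  case check_10d684 =>
    -- the arm into the loop body is dead: `n = 1`
    exact absurd (by decide) hbr_10d671
  · -- sparse book, `len = 255` (FIX 22): `valid_bits = 0`, −1
    refine ReachVia.done ?_
    have hC : Carried others frames Blk len ret e f s_10d7a8.mem := by
      rw [w_mem]
      exact (hCs.stack_store hF.geo _ 8 _ (by u_omega) (by u_omega)).store_vb hF.geo hfn 0#32 (by decide)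
    refine exit_of w_rip he0 w_rsp hC hfn hcn w_eq (by v_inv) ?_ ?_
    · rw [w_r12]
      decide
    · rw [w_r12]
      exact Or.inl (by decide)
  · -- sparse book, `valid_bits < len`: `valid_bits = 0`, −1
    refine ReachVia.done ?_
    have hC : Carried others frames Blk len ret e f s_10d7bf.mem := by
      rw [w_mem]
      exact (hCs.stack_store hF.geo _ 8 _ (by u_omega) (by u_omega)).store_vb hF.geo hfn 0#32 (by decide)
    refine exit_of w_rip he0 w_rsp hC hfn hcn w_eq (by v_inv) ?_ ?_
    · rw [w_r12]
      decide
    · rw [w_r12]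
      exact Or.inl (by decide)
  · -- sparse book, the bits are consumed: r12d = x < se = N(c)
    refine ReachVia.done ?_
    have hV := valid_bits_consumed (BitVec.ofNat 32 vbn) (BitVec.ofNat 8 lbs) hV1.1 hV1.2 hbr_10d75b
    have hC : Carried others frames Blk len ret e f s_10d76e.mem := by
      rw [w_mem]
      exact ((hCs.stack_store hF.geo _ 8 _ (by u_omega) (by u_omega)).store_acc hF.geo hfn _).store_vb hF.geo hfn _ hV
    have hi := hxN hbr_10d6f4
    have er : s_10d76e.reg .r12 = addr x := by rw [w_kept .r12 rfl]; exact h_r12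
    refine exit_of w_rip he0 w_rsp hC hfn hcn w_eq (by v_inv) ?_ ?_
    · rw [er]
      rw [toNat_addr _ (by omega)]
      omega
    · rw [er, argInt_addr x (by omega)]
      right
      rw [← hNe, hNn]
      omega
  · -- dense book, `len = 255` (FIX 22): `valid_bits = 0`, −1
    refine ReachVia.done ?_
    have hC : Carried others frames Blk len ret e f s_10d7a8.mem := by
      rw [w_mem]
      exact (hCs.stack_store hF.geo _ 8 _ (by u_omega) (by u_omega)).store_vb hF.geo hfn 0#32 (by decide)
    refine exit_of w_rip he0 w_rsp hC hfn hcn w_eq (by v_inv) ?_ ?_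
    · rw [w_r12]
      decide
    · rw [w_r12]
      exact Or.inl (by decide)
  · -- dense book, `valid_bits < len`: `valid_bits = 0`, −1
    refine ReachVia.done ?_
    have hC : Carried others frames Blk len ret e f s_10d7bf.mem := by
      rw [w_mem]
      exact (hCs.stack_store hF.geo _ 8 _ (by u_omega) (by u_omega)).store_vb hF.geo hfn 0#32 (by decide)
    refine exit_of w_rip he0 w_rsp hC hfn hcn w_eq (by v_inv) ?_ ?_
    · rw [w_r12]
      decide
    · rw [w_r12]
      exact Or.inl (by decide)
  · -- dense book, the bits are consumed: r12d = sorted_values[x] < entries = N(c)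
    refine ReachVia.done ?_
    have hV := valid_bits_consumed (BitVec.ofNat 32 vbn) (BitVec.ofNat 8 lbd) hV1.1 hV1.2 hbr_10d75b
    have hC : Carried others frames Blk len ret e f s_10d76e.mem := by
      rw [w_mem]
      exact ((hCs.stack_store hF.geo _ 8 _ (by u_omega) (by u_omega)).store_acc hF.geo hfn _).store_vb hF.geo hfn _ hV
    have hi := hyN hbr_10d6f4
    have er : s_10d76e.reg .r12 = Word.ofBV (BitVec.ofNat 32 y) := w_r12
    refine exit_of w_rip he0 w_rsp hC hfn hcn w_eq (by v_inv) ?_ ?_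
    · rw [er]
      rw [toNat_ofBV32]
      exact (BitVec.ofNat 32 y).isLt
    · rw [er, argInt_ofNat32 y (by omega)]
      right
      rw [← hNe, hNn]
      omega
  · -- the arm into the loop body is dead: `n = 1`
    exact absurd (by decide) hbr_10d671

end Vorbis.Spec.codebook_decode_scalar_raw_2

/-- Segment 2 of `codebook_decode_scalar_raw`: the three stages in sequence. -/
theorem Vorbis.Spec.Worked.codebook_decode_scalar_raw_2_ok : Vorbis.Spec.codebook_decode_scalar_raw_2.Statement := by
  unfold Vorbis.Spec.codebook_decode_scalar_raw_2.Statement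
  intro Lay hLay μ hμ u₀ hcode hload4 h_br hload8 hload1 hstore4
  unfold Vorbis.Spec.ScalarRaw.Claim2
  intro others frames Blk len ret e u hat
  -- 10D62EH … the loop head
  refine (Vorbis.Spec.codebook_decode_scalar_raw_2.pre_ok Lay hLay μ hμ u₀ hcode hload4 others frames (h_br others frames)
    Blk len ret e u hat).trans ?_
  intro s hs
  obtain ⟨x, n, hhead⟩ := hs
  -- the binary search
  refine (Vorbis.Spec.codebook_decode_scalar_raw_2.loop_ok Lay hLay μ hμ u₀ hcode hload4 hload8 others frames Blk len ret e u
    x n s hhead).trans ?_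
  intro v hv
  obtain ⟨x', hhead'⟩ := hv
  -- the loop head with `n = 1` … the exit join
  exact Vorbis.Spec.codebook_decode_scalar_raw_2.tail_ok Lay hLay μ hμ u₀ hcode hload4 hload8 hload1 hstore4 others frames
    Blk len ret e u x' v hhead'
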